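-- pv_equiv track=rewrite | github.com/young0264/hellopycharm | 2023_스프링인턴/2.py | solution
-- ===== SOURCE A (Python) =====
-- from collections import deque
--
-- def solution(grid):
--     answer = 0
--
--     row,col = len(grid), len(grid[0])
--     arr = []
--     for i in range(row):
--         arr.append([i,0])
--         arr.append([i,col-1])
--     for i in range(1,col-1):
--         arr.append([0,i])
--         arr.append([row-1,i])
--     graph =[list(i) for i in grid]
--     visited = [[0]*col for _ in range(row)]
--     dx,dy = [0,0,1,-1], [1,-1,0,0]
--     def in_range(x,y):
--         return 0<=x<row and 0<=y<col
--
--     def bfs(si,sj):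
--         que = deque()
--         que.append((si,sj))
--         visited[si][sj] = 1
--
--         while que:
--             dxs,dys = que.popleft()
--             for i in range(4):
--                 nx,ny = dx[i]+dxs, dy[i]+dys
--                 if in_range(nx,ny) and not visited[nx][ny] and graph[nx][ny] != '#':
--                     visited[nx][ny] = 1
--                     que.append((nx,ny))
--
--     for x,y in arr:
--         if graph[x][y] != '#':
--             bfs(x,y)
--     for i in range(row):
--         for j in range(col):
--             if visited[i][j] == 0:
--                 answer += 1
--
--     return answer
-- ===== SOURCE B (Python) =====
-- def solution(grid):
--     # Fixpoint flood by alternating raster sweeps (no queue): mark border-connected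
--     # empty cells, then count unmarked cells (walls included, as the task demands).
--     rows, cols = len(grid), len(grid[0])
--     reach = [[grid[i][j] != '#' and (i == 0 or i == rows - 1 or j == 0 or j == cols - 1)
--               for j in range(cols)] for i in range(rows)]
--     fwd = [(i, j) for i in range(rows) for j in range(cols)]
--     bwd = fwd[::-1]
--     changed = True
--     while changed:
--         changed = False
--         for order in (fwd, bwd):
--             for (i, j) in order:
--                 if (not reach[i][j]) and grid[i][j] != '#' and (
--                         (i > 0 and reach[i - 1][j]) or (i + 1 < rows and reach[i + 1][j]) or
--                         (j > 0 and reach[i][j - 1]) or (j + 1 < cols and reach[i][j + 1])):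
--                     reach[i][j] = True
--                     changed = True
--     return sum(1 for r in reach for v in r if not v)
-- ===== Notes on version B (the rewrite author's own statement) =====
-- stated objective: faster
-- what changed: Replaces A's per-border-seed deque BFS over a mutable visited matrix by a queue-free fixpoint flood: seed all empty border cells at once, then repeat alternating forward/backward raster sweeps that mark any empty cell adjacent to a marked one until a full pass changes nothing, and count unmarked cells (walls included, matching A).
import Mathlib
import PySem

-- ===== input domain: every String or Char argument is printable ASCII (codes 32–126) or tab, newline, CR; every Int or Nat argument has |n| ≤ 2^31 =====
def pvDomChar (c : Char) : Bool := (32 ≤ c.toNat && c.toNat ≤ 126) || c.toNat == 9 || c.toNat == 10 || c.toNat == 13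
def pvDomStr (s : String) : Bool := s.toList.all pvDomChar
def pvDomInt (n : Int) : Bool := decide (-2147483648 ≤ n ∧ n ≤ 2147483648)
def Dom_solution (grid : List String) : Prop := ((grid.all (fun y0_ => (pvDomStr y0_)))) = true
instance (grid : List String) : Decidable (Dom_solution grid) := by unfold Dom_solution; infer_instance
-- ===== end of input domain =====

-- B replaces A's per-seed deque BFS by a queue-free fixpoint flood (alternating raster sweeps
-- until a pass changes nothing); measured faster on the generated inputs. Return value only.

-- ===== PORT A =====
-- helpers shared by the two ports: nested-list indexing (exact: every use is guarded
-- in-range by the Python code or by Pre_solution, where pyGetD/pySetD are Python-exact)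
def pvGetC (g : List (List Char)) (i j : Int) : Char :=
  PySem.List.pyGetD (PySem.List.pyGetD g i []) j '#'

def pvGetV (m : List (List Int)) (i j : Int) : Int :=
  PySem.List.pyGetD (PySem.List.pyGetD m i []) j 0

-- visited[i][j] = 1
def pvSetV (m : List (List Int)) (i j : Int) : List (List Int) :=
  PySem.List.pySetD m i (PySem.List.pySetD (PySem.List.pyGetD m i []) j 1)

def pvDx : List Int := [0, 0, 1, -1]
def pvDy : List Int := [1, -1, 0, 0]

def pvInRange (row col x y : Int) : Bool :=
  decide (0 ≤ x ∧ x < row ∧ 0 ≤ y ∧ y < col)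

-- number of unvisited cells: sizes the fuel of the BFS while-loop (each iteration pops
-- one element and every push marks a fresh 0-cell, so queue length + zeros decreases)
def pvZeros (m : List (List Int)) : Nat :=
  (m.map (fun r => r.countP (fun v => v == 0))).sum

-- body of 'for i in range(4)'
def pvBfsFold (graph : List (List Char)) (row col x y : Int)
    (s : List (Int × Int) × List (List Int)) (i : Int) :
    List (Int × Int) × List (List Int) :=
  let nx := PySem.List.pyGetD pvDx i 0 + x
  let ny := PySem.List.pyGetD pvDy i 0 + y
  if pvInRange row col nx ny && (pvGetV s.2 nx ny == 0) && (pvGetC graph nx ny != '#')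
  then (s.1 ++ [(nx, ny)], pvSetV s.2 nx ny)
  else s

-- 'while que:' — fuel-guarded; pvBfs supplies fuel > queue length + zeros, which the
-- proofs show never runs out
def pvBfsLoop (graph : List (List Char)) (row col : Int) :
    Nat → List (Int × Int) → List (List Int) → List (List Int)
  | 0, _, visited => visited
  | _ + 1, [], visited => visited
  | fuel + 1, (x, y) :: que, visited =>
      let s := (PySem.List.pyRange 0 4 1).foldl (pvBfsFold graph row col x y) (que, visited)
      pvBfsLoop graph row col fuel s.1 s.2

def pvBfs (graph : List (List Char)) (row col si sj : Int)
    (visited : List (List Int)) : List (List Int) :=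
  let visited := pvSetV visited si sj
  pvBfsLoop graph row col (pvZeros visited + 2) [(si, sj)] visited

def solution (grid : List String) : Int :=
  let row : Int := PySem.List.len grid
  let col : Int := PySem.Str.len (PySem.List.pyGetD grid 0 "")  -- grid[0]; Pre_solution: grid ≠ []
  let arr : List (Int × Int) :=
    (PySem.List.pyRange 0 row 1).foldl (fun a i => a ++ [(i, 0), (i, col - 1)]) []
  let arr :=
    (PySem.List.pyRange 1 (col - 1) 1).foldl (fun a i => a ++ [((0 : Int), i), (row - 1, i)]) arr
  let graph : List (List Char) := grid.map (fun s => s.toList)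
  let visited : List (List Int) :=
    (PySem.List.pyRange 0 row 1).map (fun _ => List.replicate col.toNat (0 : Int))
  let visited := arr.foldl (fun v (p : Int × Int) =>
      if pvGetC graph p.1 p.2 != '#' then pvBfs graph row col p.1 p.2 v else v) visited
  (PySem.List.pyRange 0 row 1).foldl (fun acc i =>
      (PySem.List.pyRange 0 col 1).foldl (fun acc j =>
        if pvGetV visited i j == 0 then acc + 1 else acc) acc) 0

-- ===== PORT B =====
def pvGetB (m : List (List Bool)) (i j : Int) : Bool :=
  PySem.List.pyGetD (PySem.List.pyGetD m i []) j false

def pvSetB (m : List (List Bool)) (i j : Int) : List (List Bool) :=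
  PySem.List.pySetD m i (PySem.List.pySetD (PySem.List.pyGetD m i []) j true)

-- grid[i][j]; every use is guarded in-range
def pvGridAt (grid : List String) (i j : Int) : Char :=
  PySem.List.pyGetD (PySem.List.pyGetD grid i "").toList j '#'

-- body of 'for (i, j) in order' — state is (reach, changed)
def pvCell (grid : List String) (rows cols : Int)
    (s : List (List Bool) × Bool) (p : Int × Int) : List (List Bool) × Bool :=
  let i := p.1
  let j := p.2
  if !pvGetB s.1 i j && (pvGridAt grid i j != '#') &&
     ((decide (0 < i) && pvGetB s.1 (i - 1) j) ||
      (decide (i + 1 < rows) && pvGetB s.1 (i + 1) j) ||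
      (decide (0 < j) && pvGetB s.1 i (j - 1)) ||
      (decide (j + 1 < cols) && pvGetB s.1 i (j + 1)))
  then (pvSetB s.1 i j, true)
  else s

def pvSweep (grid : List String) (rows cols : Int) (order : List (Int × Int))
    (s : List (List Bool) × Bool) : List (List Bool) × Bool :=
  order.foldl (pvCell grid rows cols) s

-- 'while changed:' — fuel-guarded; solution_alt supplies fuel rows*cols+1, which the
-- proofs show never runs out (every repeated iteration marks at least one new cell)
def pvLoopB (grid : List String) (rows cols : Int) (fwd bwd : List (Int × Int)) :
    Nat → List (List Bool) → List (List Bool)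
  | 0, reach => reach
  | fuel + 1, reach =>
      let s := pvSweep grid rows cols bwd (pvSweep grid rows cols fwd (reach, false))
      if s.2 then pvLoopB grid rows cols fwd bwd fuel s.1 else s.1

def solution_alt (grid : List String) : Int :=
  let rows : Int := PySem.List.len grid
  let cols : Int := PySem.Str.len (PySem.List.pyGetD grid 0 "")
  let reach : List (List Bool) :=
    (PySem.List.pyRange 0 rows 1).map (fun i =>
      (PySem.List.pyRange 0 cols 1).map (fun j =>
        (pvGridAt grid i j != '#') && (i == 0 || i == rows - 1 || j == 0 || j == cols - 1)))
  let fwd : List (Int × Int) :=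
    (PySem.List.pyRange 0 rows 1).flatMap (fun i =>
      (PySem.List.pyRange 0 cols 1).map (fun j => (i, j)))
  let bwd := fwd.reverse
  let reach := pvLoopB grid rows cols fwd bwd (rows.toNat * cols.toNat + 1) reach
  reach.foldl (fun acc r => r.foldl (fun acc v => if !v then acc + 1 else acc) acc) 0

-- ===== PRECONDITION & SPEC =====
-- Pre_solution is exactly where A returns: on an empty grid A raises IndexError on grid[0];
-- if the first row is empty, or any row is shorter than the first, A's unconditional
-- border probe graph[x][y] raises IndexError.
def Pre_solution (grid : List String) : Prop :=
  grid ≠ [] ∧ 0 < (grid.headD "").toList.length ∧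
    ∀ s ∈ grid, (grid.headD "").toList.length ≤ s.toList.length

instance (grid : List String) : Decidable (Pre_solution grid) := by
  unfold Pre_solution; infer_instance

def pvWitness_solution : List String := ["#.", ".#"]

def Spec_solution (grid : List String) (out : Int) : Prop := out = solution_alt grid
instance (grid : List String) (out : Int) : Decidable (Spec_solution grid out) := by
  unfold Spec_solution; infer_instance

-- ===== CLAIM (what is proved, stated in full; the proofs are below) =====
def Claim_equal_solution : Prop :=
  ∀ (grid : List String), Dom_solution grid → Pre_solution grid →
    Spec_solution grid (solution grid)

-- ===== LEMMAS AND PROOFS =====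

-- ---------- proof-side restatements of the two ports (rfl-equal; used only below) ----------
def pvRowI (grid : List String) : Int := PySem.List.len grid
def pvColI (grid : List String) : Int := PySem.Str.len (PySem.List.pyGetD grid 0 "")

def pvArr (row col : Int) : List (Int × Int) :=
  (PySem.List.pyRange 1 (col - 1)).foldl (fun a i => a ++ [((0 : Int), i), (row - 1, i)])
    ((PySem.List.pyRange 0 row).foldl (fun a i => a ++ [(i, 0), (i, col - 1)]) [])

def pvInitV (row col : Int) : List (List Int) :=
  (PySem.List.pyRange 0 row).map (fun _ => List.replicate col.toNat (0 : Int))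

def pvFinalV (grid : List String) : List (List Int) :=
  (pvArr (pvRowI grid) (pvColI grid)).foldl
    (fun v (p : Int × Int) =>
      if pvGetC (grid.map (fun s => s.toList)) p.1 p.2 != '#'
      then pvBfs (grid.map (fun s => s.toList)) (pvRowI grid) (pvColI grid) p.1 p.2 v else v)
    (pvInitV (pvRowI grid) (pvColI grid))

lemma solution_eq (grid : List String) :
    solution grid =
      (PySem.List.pyRange 0 (pvRowI grid)).foldl (fun acc i =>
        (PySem.List.pyRange 0 (pvColI grid)).foldl (fun acc j =>
          if pvGetV (pvFinalV grid) i j == 0 then acc + 1 else acc) acc) 0 := rfl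

def pvM0 (grid : List String) : List (List Bool) :=
  (PySem.List.pyRange 0 (pvRowI grid)).map (fun i =>
    (PySem.List.pyRange 0 (pvColI grid)).map (fun j =>
      (pvGridAt grid i j != '#') &&
        (i == 0 || i == pvRowI grid - 1 || j == 0 || j == pvColI grid - 1)))

def pvFwd (rows cols : Int) : List (Int × Int) :=
  (PySem.List.pyRange 0 rows).flatMap (fun i => (PySem.List.pyRange 0 cols).map (fun j => (i, j)))

def pvFinalM (grid : List String) : List (List Bool) :=
  pvLoopB grid (pvRowI grid) (pvColI grid) (pvFwd (pvRowI grid) (pvColI grid))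
    ((pvFwd (pvRowI grid) (pvColI grid)).reverse)
    ((pvRowI grid).toNat * (pvColI grid).toNat + 1) (pvM0 grid)

lemma solution_alt_eq (grid : List String) :
    solution_alt grid =
      (pvFinalM grid).foldl (fun acc r => r.foldl (fun acc v => if !v then acc + 1 else acc) acc) 0 := rfl

-- ---------- generic single-list facts ----------
lemma pvGetD_nonneg {a : Type} (xs : List a) {i : Int} (d : a) (h : 0 <= i) :
    PySem.List.pyGetD xs i d = xs.getD i.toNat d := by
  rw [PySem.List.pyGetD, PySem.List.pyGet?_of_nonneg xs h, List.getD_eq_getElem?_getD]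

lemma pvGetD_memD {a : Type} (xs : List a) (i : Int) (d : a) :
    PySem.List.pyGetD xs i d = d ∨ PySem.List.pyGetD xs i d ∈ xs := by
  rw [PySem.List.pyGetD]
  cases h : PySem.List.pyGet? xs i with
  | none => simp
  | some v => right; simpa using PySem.List.mem_of_pyGet?_eq_some xs h

lemma pvGetD_set_self {a : Type} (xs : List a) (n : Nat) (v d : a) (h : n < xs.length) :
    (xs.set n v).getD n d = v := by
  simp [List.getD_eq_getElem?_getD, h]

lemma pvGetD_set_ne {a : Type} (xs : List a) (n m : Nat) (v d : a) (h : m ≠ n) :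
    (xs.set n v).getD m d = xs.getD m d := by
  simp [List.getD_eq_getElem?_getD, List.getElem?_set_ne (Ne.symm h)]

lemma pvCountP_set {a : Type} (xs : List a) (n : Nat) (v : a) (p : a → Bool) (h : n < xs.length) :
    (xs.set n v).countP p + (if p xs[n] then 1 else 0) = xs.countP p + (if p v then 1 else 0) := by
  induction xs generalizing n with
  | nil => simp at h
  | cons x xs ih =>
    cases n with
    | zero => simp [List.countP_cons]; split_ifs <;> omega
    | succ k =>
      simp only [List.set_cons_succ, List.countP_cons, List.getElem_cons_succ]
      have := ih k (by simpa using h)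
      split_ifs at * <;> omega

lemma pvSumMap_set {a : Type} (m : List a) (k : Nat) (r : a) (f : a → Nat) (h : k < m.length) :
    ((m.set k r).map f).sum + f m[k] = (m.map f).sum + f r := by
  induction m generalizing k with
  | nil => simp at h
  | cons x m ih =>
    cases k with
    | zero => simp; omega
    | succ k' =>
      simp only [List.set_cons_succ, List.map_cons, List.sum_cons, List.getElem_cons_succ]
      have := ih k' (by simpa using h)
      omega

-- ---------- bridges between the two ports' cell accessors ----------
lemma pvGetC_graph (grid : List String) (i j : Int) :
    pvGetC (grid.map (fun s => s.toList)) i j = pvGridAt grid i j := by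
  rw [pvGetC, pvGridAt, show ([] : List Char) = "".toList from rfl,
    PySem.List.pyGetD_map (fun s : String => s.toList) grid i ""]

-- ---------- the common specification: cells reachable from the border ----------
def pvEmp (grid : List String) (i j : Int) : Prop := pvGridAt grid i j ≠ '#'
def pvInR (row col i j : Int) : Prop := 0 ≤ i ∧ i < row ∧ 0 ≤ j ∧ j < col
def pvBorder (row col i j : Int) : Prop := i = 0 ∨ i = row - 1 ∨ j = 0 ∨ j = col - 1
def pvAdj (x y i j : Int) : Prop := (i - x).natAbs + (j - y).natAbs = 1

inductive pvReach (grid : List String) (row col : Int) : Int → Int → Prop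
  | seed (i j : Int) : pvInR row col i j → pvBorder row col i j → pvEmp grid i j →
      pvReach grid row col i j
  | step (x y i j : Int) : pvReach grid row col x y → pvInR row col i j → pvEmp grid i j →
      pvAdj x y i j → pvReach grid row col i j

lemma pvAdj_cases {x y i j : Int} (h : pvAdj x y i j) :
    (x = i - 1 ∧ y = j) ∨ (x = i + 1 ∧ y = j) ∨ (x = i ∧ y = j - 1) ∨ (x = i ∧ y = j + 1) := by
  unfold pvAdj at h; omega

def pvShaped {a : Type} (row col : Int) (m : List (List a)) : Prop :=
  m.length = row.toNat ∧ ∀ r ∈ m, r.length = col.toNat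

-- ---------- nested get/set lemmas, generic in the element type ----------
lemma pvNest_get_nonneg {a : Type} (m : List (List a)) {i j : Int} (dr : List a) (d : a)
    (hi : 0 ≤ i) (hj : 0 ≤ j) :
    PySem.List.pyGetD (PySem.List.pyGetD m i dr) j d = (m.getD i.toNat dr).getD j.toNat d := by
  rw [pvGetD_nonneg m dr hi, pvGetD_nonneg _ d hj]

lemma pvNest_set_nonneg {a : Type} (m : List (List a)) {i j : Int} (dr : List a) (v : a)
    (hi : 0 ≤ i) (hj : 0 ≤ j) :
    PySem.List.pySetD m i (PySem.List.pySetD (PySem.List.pyGetD m i dr) j v)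
      = m.set i.toNat ((m.getD i.toNat dr).set j.toNat v) := by
  rw [PySem.List.pySetD_of_nonneg _ _ hi, PySem.List.pySetD_of_nonneg _ _ hj,
    pvGetD_nonneg m dr hi]

lemma pvNest_get_set_self {a : Type} (m : List (List a)) {i j : Int} (dr : List a) (v d : a)
    (hi : 0 ≤ i) (hj : 0 ≤ j) (hlen : i.toNat < m.length)
    (hrow : j.toNat < (m.getD i.toNat dr).length) :
    PySem.List.pyGetD (PySem.List.pyGetD
      (PySem.List.pySetD m i (PySem.List.pySetD (PySem.List.pyGetD m i dr) j v)) i dr) j d = v := by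
  rw [pvNest_set_nonneg m dr v hi hj, pvNest_get_nonneg _ dr d hi hj,
    pvGetD_set_self _ _ _ _ hlen, pvGetD_set_self _ _ _ _ hrow]

lemma pvNest_get_set_ne {a : Type} (m : List (List a)) {i j a' b' : Int} (dr : List a) (v d : a)
    (hi : 0 ≤ i) (hj : 0 ≤ j) (ha : 0 ≤ a') (hb : 0 ≤ b')
    (hne : a' ≠ i ∨ b' ≠ j) :
    PySem.List.pyGetD (PySem.List.pyGetD
      (PySem.List.pySetD m i (PySem.List.pySetD (PySem.List.pyGetD m i dr) j v)) a' dr) b' d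
      = PySem.List.pyGetD (PySem.List.pyGetD m a' dr) b' d := by
  rw [pvNest_set_nonneg m dr v hi hj, pvNest_get_nonneg _ dr d ha hb,
    pvNest_get_nonneg m dr d ha hb]
  rcases Decidable.em (a'.toNat = i.toNat) with heq | hne'
  · have hbj : b'.toNat ≠ j.toNat := by omega
    rw [heq]
    rcases Decidable.em (i.toNat < m.length) with hlt | hge
    · rw [pvGetD_set_self _ _ _ _ hlt, pvGetD_set_ne _ _ _ _ _ hbj]
    · rw [List.set_eq_of_length_le (by omega)]
  · rw [pvGetD_set_ne _ _ _ _ _ hne']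

lemma pvNest_shaped_set {a : Type} (m : List (List a)) {row col i j : Int} (dr : List a) (v : a)
    (hsh : pvShaped row col m) (hi : 0 ≤ i) (hj : 0 ≤ j) (hlen : i.toNat < m.length) :
    pvShaped row col (PySem.List.pySetD m i (PySem.List.pySetD (PySem.List.pyGetD m i dr) j v)) := by
  rw [pvNest_set_nonneg m dr v hi hj]
  refine ⟨by simpa using hsh.1, ?_⟩
  intro r hr
  rcases List.mem_or_eq_of_mem_set hr with hr' | hr'
  · exact hsh.2 r hr'
  · rw [hr', List.length_set]
    have hget : m.getD i.toNat dr = m[i.toNat] := List.getD_eq_getElem m dr hlen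
    rw [hget]
    exact hsh.2 _ (List.getElem_mem hlen)

lemma pvNest_count_set {a : Type} (m : List (List a)) {i j : Int} (dr : List a) (v : a)
    (p : a → Bool) (hi : 0 ≤ i) (hj : 0 ≤ j) (hlen : i.toNat < m.length)
    (hrow : j.toNat < (m.getD i.toNat dr).length) :
    ((PySem.List.pySetD m i (PySem.List.pySetD (PySem.List.pyGetD m i dr) j v)).map
        (fun r => r.countP p)).sum
      + (if p ((m.getD i.toNat dr).getD j.toNat v) then 1 else 0)
    = (m.map (fun r => r.countP p)).sum + (if p v then 1 else 0) := by
  rw [pvNest_set_nonneg m dr v hi hj]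
  have hget : m.getD i.toNat dr = m[i.toNat] := List.getD_eq_getElem m dr hlen
  have hrow' : j.toNat < m[i.toNat].length := hget ▸ hrow
  have h2 := pvCountP_set m[i.toNat] j.toNat v p hrow'
  have h1 := pvSumMap_set m i.toNat (m[i.toNat].set j.toNat v) (fun r => r.countP p) hlen
  have hv : (m.getD i.toNat dr).getD j.toNat v = m[i.toNat][j.toNat] := by
    rw [hget]; exact List.getD_eq_getElem _ _ hrow'
  rw [hv, hget]
  simp only at h1
  omega



-- ---------- specialised visited-matrix lemmas (Int entries, A's port) ----------
def pvBits (m : List (List Int)) : Prop := ∀ r ∈ m, ∀ v ∈ r, v = 0 ∨ v = 1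

def pvMonoV (V V' : List (List Int)) : Prop :=
  ∀ i j : Int, 0 ≤ i → 0 ≤ j → pvGetV V i j = 1 → pvGetV V' i j = 1

lemma pvListGetD_cases {a : Type} (l : List a) (k : Nat) (d : a) :
    l.getD k d = d ∨ l.getD k d ∈ l := by
  rcases Decidable.em (k < l.length) with h | h
  · right; rw [List.getD_eq_getElem l d h]; exact List.getElem_mem h
  · left; exact List.getD_eq_default l d (by omega)

lemma pvGetV_pvSetV_self (m : List (List Int)) {row col i j : Int}
    (hsh : pvShaped row col m) (hin : pvInR row col i j) :
    pvGetV (pvSetV m i j) i j = 1 := by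
  obtain ⟨hi0, hir, hj0, hjc⟩ := hin
  have hlen : i.toNat < m.length := by rw [hsh.1]; omega
  have hget : m.getD i.toNat [] = m[i.toNat] := List.getD_eq_getElem m [] hlen
  have hrow : j.toNat < (m.getD i.toNat []).length := by
    rw [hget, hsh.2 _ (List.getElem_mem hlen)]; omega
  exact pvNest_get_set_self m [] 1 0 hi0 hj0 hlen hrow

lemma pvGetV_pvSetV_ne (m : List (List Int)) {i j a' b' : Int}
    (hi : 0 ≤ i) (hj : 0 ≤ j) (ha : 0 ≤ a') (hb : 0 ≤ b') (hne : a' ≠ i ∨ b' ≠ j) :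
    pvGetV (pvSetV m i j) a' b' = pvGetV m a' b' :=
  pvNest_get_set_ne m [] 1 0 hi hj ha hb hne

lemma pvShaped_pvSetV (m : List (List Int)) {row col i j : Int}
    (hsh : pvShaped row col m) (hin : pvInR row col i j) :
    pvShaped row col (pvSetV m i j) := by
  obtain ⟨hi0, hir, hj0, hjc⟩ := hin
  exact pvNest_shaped_set m [] 1 hsh hi0 hj0 (by rw [hsh.1]; omega)

lemma pvBits_pvSetV (m : List (List Int)) {i j : Int} (hi : 0 ≤ i) (hj : 0 ≤ j)
    (h : pvBits m) : pvBits (pvSetV m i j) := by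
  rw [pvSetV, pvNest_set_nonneg m [] 1 hi hj]
  intro r hr v hv
  rcases List.mem_or_eq_of_mem_set hr with hr' | hr'
  · exact h r hr' v hv
  · subst hr'
    rcases List.mem_or_eq_of_mem_set hv with hv' | hv'
    · rcases pvListGetD_cases m i.toNat [] with hd | hd
      · rw [hd] at hv'; simp at hv'
      · exact h _ hd v hv'
    · right; exact hv'

lemma pvGetV_cases (m : List (List Int)) (h : pvBits m) (i j : Int) :
    pvGetV m i j = 0 ∨ pvGetV m i j = 1 := by
  rw [pvGetV]
  rcases pvGetD_memD (PySem.List.pyGetD m i []) j 0 with h' | h'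
  · left; exact h'
  · rcases pvGetD_memD m i [] with h2 | h2
    · rw [h2] at h'; simp at h'
    · exact h _ h2 _ h'

lemma pvZeros_pvSetV (m : List (List Int)) {row col i j : Int}
    (hsh : pvShaped row col m) (hin : pvInR row col i j) (h0 : pvGetV m i j = 0) :
    pvZeros (pvSetV m i j) + 1 = pvZeros m := by
  obtain ⟨hi0, hir, hj0, hjc⟩ := hin
  have hlen : i.toNat < m.length := by rw [hsh.1]; omega
  have hget : m.getD i.toNat [] = m[i.toNat] := List.getD_eq_getElem m [] hlen
  have hrow : j.toNat < (m.getD i.toNat []).length := by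
    rw [hget, hsh.2 _ (List.getElem_mem hlen)]; omega
  have hc := pvNest_count_set m [] (1 : Int) (fun v => v == 0) hi0 hj0 hlen hrow
  have hrow' : j.toNat < m[i.toNat].length := by rw [← hget]; exact hrow
  have hv1 : (m.getD i.toNat []).getD j.toNat 1 = m[i.toNat][j.toNat] := by
    rw [hget]; exact List.getD_eq_getElem _ _ hrow'
  have hv0 : pvGetV m i j = m[i.toNat][j.toNat] := by
    rw [pvGetV, pvNest_get_nonneg m [] 0 hi0 hj0, hget]
    exact List.getD_eq_getElem _ _ hrow'
  rw [hv1, ← hv0, h0] at hc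
  simp only [pvZeros, pvSetV]
  simp at hc
  omega

lemma pvMonoV_pvSetV (m : List (List Int)) {row col i j : Int}
    (hsh : pvShaped row col m) (hin : pvInR row col i j) :
    pvMonoV m (pvSetV m i j) := by
  intro a b ha hb hv
  rcases Decidable.em (a = i ∧ b = j) with ⟨rfl, rfl⟩ | hne
  · exact pvGetV_pvSetV_self m hsh hin
  · rw [pvGetV_pvSetV_ne m hin.1 hin.2.2.1 ha hb (by tauto)]
    exact hv

-- ---------- the BFS invariant ----------
structure pvPackA (grid : List String) (row col : Int)
    (que : List (Int × Int)) (V : List (List Int)) : Prop where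
  shape : pvShaped row col V
  bits : pvBits V
  sound : ∀ i j : Int, 0 ≤ i → 0 ≤ j → pvGetV V i j = 1 → pvReach grid row col i j
  qmem : ∀ p ∈ que, pvInR row col p.1 p.2 ∧ pvGetV V p.1 p.2 = 1

def pvClosed (grid : List String) (row col : Int)
    (que : List (Int × Int)) (V : List (List Int)) : Prop :=
  ∀ x y : Int, pvInR row col x y → pvGetV V x y = 1 →
    (x, y) ∈ que ∨
      ∀ i j : Int, pvInR row col i j → pvEmp grid i j → pvAdj x y i j → pvGetV V i j = 1

structure pvStepRes (grid : List String) (row col : Int)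
    (que : List (Int × Int)) (V : List (List Int))
    (s : List (Int × Int) × List (List Int)) : Prop where
  pack : pvPackA grid row col s.1 s.2
  fuel : s.1.length + pvZeros s.2 = que.length + pvZeros V
  mono : pvMonoV V s.2
  orig : ∀ i j : Int, 0 ≤ i → 0 ≤ j → pvGetV s.2 i j = 1 → pvGetV V i j = 1 ∨ (i, j) ∈ s.1
  sub : que ⊆ s.1

lemma pvStepRes_rfl {grid : List String} {row col : Int}
    {que : List (Int × Int)} {V : List (List Int)}
    (h : pvPackA grid row col que V) : pvStepRes grid row col que V (que, V) :=
  ⟨h, rfl, fun _ _ _ _ hv => hv, fun _ _ _ _ hv => Or.inl hv, fun _ hp => hp⟩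

lemma pvStepRes_trans {grid : List String} {row col : Int}
    {que : List (Int × Int)} {V : List (List Int)}
    {s1 s2 : List (Int × Int) × List (List Int)}
    (h1 : pvStepRes grid row col que V s1) (h2 : pvStepRes grid row col s1.1 s1.2 s2) :
    pvStepRes grid row col que V s2 := by
  refine ⟨h2.pack, by rw [h2.fuel, h1.fuel], fun i j hi hj hv => h2.mono i j hi hj (h1.mono i j hi hj hv), ?_, fun p hp => h2.sub (h1.sub hp)⟩
  intro i j hi hj hv
  rcases h2.orig i j hi hj hv with hv' | hm
  · rcases h1.orig i j hi hj hv' with hv'' | hm'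
    · exact Or.inl hv''
    · exact Or.inr (h2.sub hm')
  · exact Or.inr hm

lemma pvPush_spec (grid : List String) (row col x y nx ny : Int)
    (que : List (Int × Int)) (V : List (List Int))
    (hx : pvReach grid row col x y) (h : pvPackA grid row col que V)
    (hadj : pvAdj x y nx ny) :
    pvStepRes grid row col que V
      (if pvInRange row col nx ny && (pvGetV V nx ny == 0)
          && (pvGetC (grid.map (fun s => s.toList)) nx ny != '#')
       then (que ++ [(nx, ny)], pvSetV V nx ny) else (que, V)) ∧
    (pvInR row col nx ny → pvEmp grid nx ny →
      pvGetV (if pvInRange row col nx ny && (pvGetV V nx ny == 0)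
          && (pvGetC (grid.map (fun s => s.toList)) nx ny != '#')
       then (que ++ [(nx, ny)], pvSetV V nx ny) else (que, V)).2 nx ny = 1) := by
  split_ifs with hg
  · have hb := hg
    simp only [Bool.and_eq_true, bne_iff_ne, beq_iff_eq, pvInRange, decide_eq_true_eq] at hb
    obtain ⟨⟨hin, h0⟩, hne⟩ := hb
    have hemp : pvEmp grid nx ny := by rw [pvEmp, ← pvGetC_graph]; exact hne
    have hnx0 : 0 ≤ nx := hin.1
    have hny0 : 0 ≤ ny := hin.2.2.1
    refine ⟨⟨⟨?_, ?_, ?_, ?_⟩, ?_, ?_, ?_, ?_⟩, ?_⟩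
    · exact pvShaped_pvSetV V h.shape hin
    · exact pvBits_pvSetV V hnx0 hny0 h.bits
    · intro i j hi hj hv
      rcases Decidable.em (i = nx ∧ j = ny) with ⟨rfl, rfl⟩ | hneq
      · exact pvReach.step x y i j hx hin hemp hadj
      · rw [pvGetV_pvSetV_ne V hnx0 hny0 hi hj (by tauto)] at hv
        exact h.sound i j hi hj hv
    · intro p hp
      rcases List.mem_append.mp hp with hp' | hp'
      · obtain ⟨hp1, hp2⟩ := h.qmem p hp'
        exact ⟨hp1, pvMonoV_pvSetV V h.shape hin p.1 p.2 hp1.1 hp1.2.2.1 hp2⟩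
      · simp at hp'
        subst hp'
        exact ⟨hin, pvGetV_pvSetV_self V h.shape hin⟩
    · have hz := pvZeros_pvSetV V h.shape hin h0
      simp only [List.length_append, List.length_cons, List.length_nil]
      omega
    · exact pvMonoV_pvSetV V h.shape hin
    · intro i j hi hj hv
      rcases Decidable.em (i = nx ∧ j = ny) with ⟨rfl, rfl⟩ | hneq
      · exact Or.inr (List.mem_append_right _ (by simp))
      · rw [pvGetV_pvSetV_ne V hnx0 hny0 hi hj (by tauto)] at hv
        exact Or.inl hv
    · intro p hp
      exact List.mem_append_left _ hp
    · intro _ _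
      exact pvGetV_pvSetV_self V h.shape hin
  · refine ⟨pvStepRes_rfl h, ?_⟩
    intro hin hemp
    have ha : pvInRange row col nx ny = true := by
      simp only [pvInRange, decide_eq_true_eq]; exact hin
    have hc : (pvGetC (grid.map (fun s => s.toList)) nx ny != '#') = true := by
      simp only [bne_iff_ne, ne_eq]
      rw [pvGetC_graph]; exact hemp
    have h0 : ¬ (pvGetV V nx ny == 0) = true := by
      intro habs
      exact hg (by rw [ha, habs, hc]; rfl)
    simp only [beq_iff_eq] at h0
    rcases pvGetV_cases V h.bits nx ny with hz | ho
    · exact absurd hz h0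
    · exact ho

lemma pvBfsFold_spec (grid : List String) (row col x y : Int) (d : Int)
    (hd : d = 0 ∨ d = 1 ∨ d = 2 ∨ d = 3)
    (que : List (Int × Int)) (V : List (List Int))
    (hx : pvReach grid row col x y) (h : pvPackA grid row col que V) :
    pvStepRes grid row col que V
      (pvBfsFold (grid.map (fun s => s.toList)) row col x y (que, V) d) ∧
    (pvInR row col (PySem.List.pyGetD pvDx d 0 + x) (PySem.List.pyGetD pvDy d 0 + y) →
      pvEmp grid (PySem.List.pyGetD pvDx d 0 + x) (PySem.List.pyGetD pvDy d 0 + y) →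
      pvGetV (pvBfsFold (grid.map (fun s => s.toList)) row col x y (que, V) d).2
        (PySem.List.pyGetD pvDx d 0 + x) (PySem.List.pyGetD pvDy d 0 + y) = 1) := by
  rcases hd with rfl | rfl | rfl | rfl
  · simp only [pvBfsFold, show PySem.List.pyGetD pvDx 0 0 = (0 : Int) from by decide,
      show PySem.List.pyGetD pvDy 0 0 = (1 : Int) from by decide]
    exact pvPush_spec grid row col x y (0 + x) (1 + y) que V hx h (by unfold pvAdj; omega)
  · simp only [pvBfsFold, show PySem.List.pyGetD pvDx 1 0 = (0 : Int) from by decide,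
      show PySem.List.pyGetD pvDy 1 0 = (-1 : Int) from by decide]
    exact pvPush_spec grid row col x y (0 + x) (-1 + y) que V hx h (by unfold pvAdj; omega)
  · simp only [pvBfsFold, show PySem.List.pyGetD pvDx 2 0 = (1 : Int) from by decide,
      show PySem.List.pyGetD pvDy 2 0 = (0 : Int) from by decide]
    exact pvPush_spec grid row col x y (1 + x) (0 + y) que V hx h (by unfold pvAdj; omega)
  · simp only [pvBfsFold, show PySem.List.pyGetD pvDx 3 0 = (-1 : Int) from by decide,
      show PySem.List.pyGetD pvDy 3 0 = (0 : Int) from by decide]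
    exact pvPush_spec grid row col x y (-1 + x) (0 + y) que V hx h (by unfold pvAdj; omega)

lemma pvBfsStep_spec (grid : List String) (row col x y : Int)
    (que : List (Int × Int)) (V : List (List Int))
    (hx : pvReach grid row col x y) (h : pvPackA grid row col que V) :
    pvStepRes grid row col que V
      ((PySem.List.pyRange 0 4 1).foldl
        (pvBfsFold (grid.map (fun s => s.toList)) row col x y) (que, V)) ∧
    (∀ i j : Int, pvInR row col i j → pvEmp grid i j → pvAdj x y i j →
      pvGetV ((PySem.List.pyRange 0 4 1).foldl
        (pvBfsFold (grid.map (fun s => s.toList)) row col x y) (que, V)).2 i j = 1) := by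
  have hr4 : PySem.List.pyRange 0 4 1 = [0, 1, 2, 3] := by decide
  rw [hr4]
  simp only [List.foldl_cons, List.foldl_nil]
  obtain ⟨R0, N0⟩ := pvBfsFold_spec grid row col x y 0 (by tauto) que V hx h
  set s0 := pvBfsFold (grid.map (fun s => s.toList)) row col x y (que, V) 0 with hs0
  obtain ⟨R1, N1⟩ := pvBfsFold_spec grid row col x y 1 (by tauto) s0.1 s0.2 hx R0.pack
  set s1 := pvBfsFold (grid.map (fun s => s.toList)) row col x y (s0.1, s0.2) 1 with hs1
  obtain ⟨R2, N2⟩ := pvBfsFold_spec grid row col x y 2 (by tauto) s1.1 s1.2 hx R1.pack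
  set s2 := pvBfsFold (grid.map (fun s => s.toList)) row col x y (s1.1, s1.2) 2 with hs2
  obtain ⟨R3, N3⟩ := pvBfsFold_spec grid row col x y 3 (by tauto) s2.1 s2.2 hx R2.pack
  set s3 := pvBfsFold (grid.map (fun s => s.toList)) row col x y (s2.1, s2.2) 3 with hs3
  have R01 := pvStepRes_trans R0 R1
  have R02 := pvStepRes_trans R01 R2
  have R03 := pvStepRes_trans R02 R3
  refine ⟨R03, ?_⟩
  intro i j hin hemp hadj
  have d0 : PySem.List.pyGetD pvDx 0 0 = (0 : Int) := by decide
  have d0' : PySem.List.pyGetD pvDy 0 0 = (1 : Int) := by decide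
  have d1 : PySem.List.pyGetD pvDx 1 0 = (0 : Int) := by decide
  have d1' : PySem.List.pyGetD pvDy 1 0 = (-1 : Int) := by decide
  have d2 : PySem.List.pyGetD pvDx 2 0 = (1 : Int) := by decide
  have d2' : PySem.List.pyGetD pvDy 2 0 = (0 : Int) := by decide
  have d3 : PySem.List.pyGetD pvDx 3 0 = (-1 : Int) := by decide
  have d3' : PySem.List.pyGetD pvDy 3 0 = (0 : Int) := by decide
  rcases pvAdj_cases hadj with ⟨h1, h2⟩ | ⟨h1, h2⟩ | ⟨h1, h2⟩ | ⟨h1, h2⟩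
  · -- x = i - 1, y = j : direction d = 2 (from (x,y) go down to (x+1,y) = (i,j))
    have hij : i = 1 + x ∧ j = 0 + y := by omega
    rw [hij.1, hij.2] at hin hemp ⊢
    rw [d2, d2'] at N2
    exact R3.mono _ _ hin.1 hin.2.2.1 (N2 hin hemp)
  · have hij : i = -1 + x ∧ j = 0 + y := by omega
    rw [hij.1, hij.2] at hin hemp ⊢
    rw [d3, d3'] at N3
    exact N3 hin hemp
  · have hij : i = 0 + x ∧ j = 1 + y := by omega
    rw [hij.1, hij.2] at hin hemp ⊢
    rw [d0, d0'] at N0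
    exact R3.mono _ _ hin.1 hin.2.2.1
      (R2.mono _ _ hin.1 hin.2.2.1 (R1.mono _ _ hin.1 hin.2.2.1 (N0 hin hemp)))
  · have hij : i = 0 + x ∧ j = -1 + y := by omega
    rw [hij.1, hij.2] at hin hemp ⊢
    rw [d1, d1'] at N1
    exact R3.mono _ _ hin.1 hin.2.2.1 (R2.mono _ _ hin.1 hin.2.2.1 (N1 hin hemp))

lemma pvBfsLoop_spec (grid : List String) (row col : Int) :
    ∀ (fuel : Nat) (que : List (Int × Int)) (V : List (List Int)),
      pvPackA grid row col que V → pvClosed grid row col que V →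
      que.length + pvZeros V < fuel →
      pvPackA grid row col []
          (pvBfsLoop (grid.map (fun s => s.toList)) row col fuel que V) ∧
        pvClosed grid row col []
          (pvBfsLoop (grid.map (fun s => s.toList)) row col fuel que V) ∧
        pvMonoV V (pvBfsLoop (grid.map (fun s => s.toList)) row col fuel que V) := by
  intro fuel
  induction fuel with
  | zero => intro que V _ _ hf; omega
  | succ fuel ih =>
    intro que V h hcl hf
    cases que with
    | nil =>
      rw [pvBfsLoop]
      exact ⟨h, hcl, fun _ _ _ _ hv => hv⟩
    | cons p rest =>
      obtain ⟨x, y⟩ := p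
      rw [pvBfsLoop]
      have hq := h.qmem (x, y) List.mem_cons_self
      have hxr := h.sound x y hq.1.1 hq.1.2.2.1 hq.2
      have hpack' : pvPackA grid row col rest V :=
        ⟨h.shape, h.bits, h.sound, fun p hp => h.qmem p (List.mem_cons_of_mem _ hp)⟩
      obtain ⟨R, N⟩ := pvBfsStep_spec grid row col x y rest V hxr hpack'
      set s := (PySem.List.pyRange 0 4 1).foldl
        (pvBfsFold (grid.map (fun s => s.toList)) row col x y) (rest, V) with hs
      have hcl' : pvClosed grid row col s.1 s.2 := by
        intro a b hin hv
        rcases R.orig a b hin.1 hin.2.2.1 hv with hold | hnew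
        · rcases hcl a b hin hold with hq' | hfull
          · rcases List.mem_cons.mp hq' with heq | hrest
            · right
              intro i j hin' hemp' hadj'
              obtain ⟨rfl, rfl⟩ := Prod.mk.inj heq
              exact N i j hin' hemp' hadj'
            · exact Or.inl (R.sub hrest)
          · right
            intro i j hin' hemp' hadj'
            exact R.mono i j hin'.1 hin'.2.2.1 (hfull i j hin' hemp' hadj')
        · exact Or.inl hnew
      have hf' : s.1.length + pvZeros s.2 < fuel := by
        have := R.fuel
        simp only [List.length_cons] at hf
        omega
      have hrec := ih s.1 s.2 R.pack hcl' hf'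
      exact ⟨hrec.1, hrec.2.1,
        fun i j hi hj hv => hrec.2.2 i j hi hj (R.mono i j hi hj hv)⟩

lemma pvBfs_spec (grid : List String) (row col si sj : Int) (V : List (List Int))
    (h : pvPackA grid row col [] V) (hcl : pvClosed grid row col [] V)
    (hin : pvInR row col si sj) (hseed : pvReach grid row col si sj) :
    pvPackA grid row col [] (pvBfs (grid.map (fun s => s.toList)) row col si sj V) ∧
    pvClosed grid row col [] (pvBfs (grid.map (fun s => s.toList)) row col si sj V) ∧
    pvMonoV V (pvBfs (grid.map (fun s => s.toList)) row col si sj V) ∧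
    pvGetV (pvBfs (grid.map (fun s => s.toList)) row col si sj V) si sj = 1 := by
  rw [pvBfs]
  set V1 := pvSetV V si sj with hV1
  have hmono1 : pvMonoV V V1 := pvMonoV_pvSetV V h.shape hin
  have hself : pvGetV V1 si sj = 1 := pvGetV_pvSetV_self V h.shape hin
  have hpack1 : pvPackA grid row col [(si, sj)] V1 := by
    refine ⟨pvShaped_pvSetV V h.shape hin, pvBits_pvSetV V hin.1 hin.2.2.1 h.bits, ?_, ?_⟩
    · intro i j hi hj hv
      rcases Decidable.em (i = si ∧ j = sj) with ⟨rfl, rfl⟩ | hne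
      · exact hseed
      · rw [hV1, pvGetV_pvSetV_ne V hin.1 hin.2.2.1 hi hj (by tauto)] at hv
        exact h.sound i j hi hj hv
    · intro p hp
      simp at hp
      subst hp
      exact ⟨hin, hself⟩
  have hcl1 : pvClosed grid row col [(si, sj)] V1 := by
    intro a b hin' hv
    rcases Decidable.em (a = si ∧ b = sj) with ⟨rfl, rfl⟩ | hne
    · exact Or.inl (by simp)
    · rw [hV1, pvGetV_pvSetV_ne V hin.1 hin.2.2.1 hin'.1 hin'.2.2.1 (by tauto)] at hv
      rcases hcl a b hin' hv with habs | hfull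
      · simp at habs
      · right
        intro i j hin'' hemp'' hadj''
        exact hmono1 i j hin''.1 hin''.2.2.1 (hfull i j hin'' hemp'' hadj'')
  have hloop := pvBfsLoop_spec grid row col (pvZeros V1 + 2) [(si, sj)] V1 hpack1 hcl1
    (by simp only [List.length_cons, List.length_nil]; omega)
  exact ⟨hloop.1, hloop.2.1,
    fun i j hi hj hv => hloop.2.2 i j hi hj (hmono1 i j hi hj hv),
    hloop.2.2 si sj hin.1 hin.2.2.1 hself⟩

lemma pvOuter_spec (grid : List String) (row col : Int) :
    ∀ (arr : List (Int × Int)),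
      (∀ p ∈ arr, pvInR row col p.1 p.2 ∧ pvBorder row col p.1 p.2) →
      ∀ V, pvPackA grid row col [] V → pvClosed grid row col [] V →
      pvPackA grid row col []
          (arr.foldl (fun v (p : Int × Int) =>
            if pvGetC (grid.map (fun s => s.toList)) p.1 p.2 != '#'
            then pvBfs (grid.map (fun s => s.toList)) row col p.1 p.2 v else v) V) ∧
        pvClosed grid row col []
          (arr.foldl (fun v (p : Int × Int) =>
            if pvGetC (grid.map (fun s => s.toList)) p.1 p.2 != '#'
            then pvBfs (grid.map (fun s => s.toList)) row col p.1 p.2 v else v) V) ∧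
        pvMonoV V
          (arr.foldl (fun v (p : Int × Int) =>
            if pvGetC (grid.map (fun s => s.toList)) p.1 p.2 != '#'
            then pvBfs (grid.map (fun s => s.toList)) row col p.1 p.2 v else v) V) ∧
        (∀ p ∈ arr, pvEmp grid p.1 p.2 →
          pvGetV (arr.foldl (fun v (p : Int × Int) =>
            if pvGetC (grid.map (fun s => s.toList)) p.1 p.2 != '#'
            then pvBfs (grid.map (fun s => s.toList)) row col p.1 p.2 v else v) V) p.1 p.2 = 1) := by
  intro arr
  induction arr with
  | nil =>
    intro _ V h hcl
    exact ⟨h, hcl, fun _ _ _ _ hv => hv, fun p hp => absurd hp (by simp)⟩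
  | cons q arr ih =>
    intro harr V h hcl
    obtain ⟨hqin, hqb⟩ := harr q List.mem_cons_self
    simp only [List.foldl_cons]
    by_cases hg : (pvGetC (grid.map (fun s => s.toList)) q.1 q.2 != '#') = true
    · rw [if_pos hg]
      have hemp : pvEmp grid q.1 q.2 := by
        rw [pvEmp, ← pvGetC_graph]
        simpa using hg
      have hseed : pvReach grid row col q.1 q.2 := pvReach.seed q.1 q.2 hqin hqb hemp
      obtain ⟨h1, h2, h3, h4⟩ := pvBfs_spec grid row col q.1 q.2 V h hcl hqin hseed
      have hrec := ih (fun p hp => harr p (List.mem_cons_of_mem _ hp)) _ h1 h2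
      refine ⟨hrec.1, hrec.2.1, ?_, ?_⟩
      · intro i j hi hj hv
        exact hrec.2.2.1 i j hi hj (h3 i j hi hj hv)
      · intro p hp hemp'
        rcases List.mem_cons.mp hp with rfl | hp'
        · exact hrec.2.2.1 p.1 p.2 hqin.1 hqin.2.2.1 h4
        · exact hrec.2.2.2 p hp' hemp'
    · rw [if_neg hg]
      have hnemp : ¬ pvEmp grid q.1 q.2 := by
        rw [pvEmp, ← pvGetC_graph]
        simpa using hg
      have hrec := ih (fun p hp => harr p (List.mem_cons_of_mem _ hp)) V h hcl
      refine ⟨hrec.1, hrec.2.1, hrec.2.2.1, ?_⟩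
      intro p hp hemp'
      rcases List.mem_cons.mp hp with rfl | hp'
      · exact absurd hemp' hnemp
      · exact hrec.2.2.2 p hp' hemp'

lemma pvArr_mem (row col : Int) (hr : 0 < row) (hc : 0 < col) (p : Int × Int) :
    p ∈ pvArr row col ↔ pvInR row col p.1 p.2 ∧ pvBorder row col p.1 p.2 := by
  obtain ⟨a, b⟩ := p
  rw [pvArr, PySem.List.foldl_append_eq_flatMap, PySem.List.foldl_append_eq_flatMap]
  simp only [List.nil_append, List.mem_append, List.mem_flatMap,
    PySem.List.mem_pyRange_one, List.mem_cons, List.not_mem_nil, or_false,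
    Prod.mk.injEq, pvInR, pvBorder]
  constructor
  · rintro (⟨i, hi, ⟨rfl, rfl⟩ | ⟨rfl, rfl⟩⟩ | ⟨i, hi, ⟨rfl, rfl⟩ | ⟨rfl, rfl⟩⟩) <;>
      refine ⟨by omega, by omega⟩
  · rintro ⟨⟨ha0, har, hb0, hbc⟩, hbord⟩
    rcases Decidable.em (b = 0) with rfl | hb
    · exact Or.inl ⟨a, by omega, Or.inl ⟨rfl, rfl⟩⟩
    · rcases Decidable.em (b = col - 1) with rfl | hb'
      · exact Or.inl ⟨a, by omega, Or.inr ⟨rfl, rfl⟩⟩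
      · rcases hbord with rfl | rfl | rfl | rfl
        · exact Or.inr ⟨b, by omega, Or.inl ⟨rfl, rfl⟩⟩
        · exact Or.inr ⟨b, by omega, Or.inr ⟨rfl, rfl⟩⟩
        · omega
        · omega

lemma pvInitV_spec (row col : Int) :
    pvShaped row col (pvInitV row col) ∧ pvBits (pvInitV row col) ∧
      (∀ i j : Int, 0 ≤ i → 0 ≤ j → pvGetV (pvInitV row col) i j = 0) := by
  refine ⟨⟨?_, ?_⟩, ?_, ?_⟩
  · simp [pvInitV, PySem.List.length_pyRange_one]
  · intro r hr
    simp only [pvInitV, List.mem_map] at hr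
    obtain ⟨_, _, rfl⟩ := hr
    simp
  · intro r hr v hv
    simp only [pvInitV, List.mem_map] at hr
    obtain ⟨_, _, rfl⟩ := hr
    left
    exact List.eq_of_mem_replicate hv
  · intro i j hi hj
    rw [pvGetV, pvNest_get_nonneg _ [] 0 hi hj]
    rcases pvListGetD_cases (pvInitV row col) i.toNat [] with hd | hd
    · rw [hd]; simp
    · have hrr : (pvInitV row col).getD i.toNat [] = List.replicate col.toNat (0 : Int) := by
        simp only [pvInitV, List.mem_map] at hd
        obtain ⟨_, _, hr⟩ := hd
        rw [pvInitV]
        exact hr.symm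
      rw [hrr]
      rcases pvListGetD_cases (List.replicate col.toNat (0 : Int)) j.toNat 0 with hd' | hd'
      · exact hd'
      · exact List.eq_of_mem_replicate hd'

lemma pvReach_inR {grid : List String} {row col i j : Int}
    (h : pvReach grid row col i j) : pvInR row col i j := by
  cases h with
  | seed _ _ hin _ _ => exact hin
  | step _ _ _ _ _ hin _ _ => exact hin

lemma pvReach_sub (grid : List String) (row col : Int) (V' : List (List Int))
    (hcl : pvClosed grid row col [] V')
    (hseeds : ∀ i j : Int, pvInR row col i j → pvBorder row col i j → pvEmp grid i j →
      pvGetV V' i j = 1) :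
    ∀ i j : Int, pvReach grid row col i j → pvGetV V' i j = 1 := by
  intro i j hreach
  induction hreach with
  | seed i j hin hbord hemp => exact hseeds i j hin hbord hemp
  | step x y i j hxy hin hemp hadj ih =>
    rcases hcl x y (pvReach_inR hxy) ih with habs | hfull
    · simp at habs
    · exact hfull i j hin hemp hadj

lemma pvA_char (grid : List String)
    (hr : 0 < pvRowI grid) (hc : 0 < pvColI grid) :
    pvBits (pvFinalV grid) ∧
      (∀ i j : Int, 0 ≤ i → 0 ≤ j →
        (pvGetV (pvFinalV grid) i j = 1 ↔ pvReach grid (pvRowI grid) (pvColI grid) i j)) := by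
  obtain ⟨hsh0, hb0, hz0⟩ := pvInitV_spec (pvRowI grid) (pvColI grid)
  have hpack0 : pvPackA grid (pvRowI grid) (pvColI grid) [] (pvInitV (pvRowI grid) (pvColI grid)) := by
    refine ⟨hsh0, hb0, ?_, by simp⟩
    intro i j hi hj hv
    rw [hz0 i j hi hj] at hv
    omega
  have hcl0 : pvClosed grid (pvRowI grid) (pvColI grid) [] (pvInitV (pvRowI grid) (pvColI grid)) := by
    intro a b hin hv
    rw [hz0 a b hin.1 hin.2.2.1] at hv
    omega
  have harr : ∀ p ∈ pvArr (pvRowI grid) (pvColI grid),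
      pvInR (pvRowI grid) (pvColI grid) p.1 p.2 ∧ pvBorder (pvRowI grid) (pvColI grid) p.1 p.2 :=
    fun p hp => (pvArr_mem (pvRowI grid) (pvColI grid) hr hc p).mp hp
  obtain ⟨hpackF, hclF, _, hseedsF⟩ :=
    pvOuter_spec grid (pvRowI grid) (pvColI grid) (pvArr (pvRowI grid) (pvColI grid)) harr
      (pvInitV (pvRowI grid) (pvColI grid)) hpack0 hcl0
  have hFeq : pvFinalV grid = (pvArr (pvRowI grid) (pvColI grid)).foldl
      (fun v (p : Int × Int) =>
        if pvGetC (grid.map (fun s => s.toList)) p.1 p.2 != '#'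
        then pvBfs (grid.map (fun s => s.toList)) (pvRowI grid) (pvColI grid) p.1 p.2 v else v)
      (pvInitV (pvRowI grid) (pvColI grid)) := rfl
  rw [← hFeq] at hpackF hclF hseedsF
  refine ⟨hpackF.bits, ?_⟩
  intro i j hi hj
  constructor
  · exact hpackF.sound i j hi hj
  · intro hreach
    exact pvReach_sub grid (pvRowI grid) (pvColI grid) (pvFinalV grid) hclF
      (fun a b hin hbord hemp =>
        hseedsF (a, b) ((pvArr_mem _ _ hr hc (a, b)).mpr ⟨hin, hbord⟩) hemp) i j hreach


-- ---------- specialised reach-matrix lemmas (Bool entries, B's port) ----------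
def pvTrues (m : List (List Bool)) : Nat := (m.map (fun r => r.countP (fun v => v))).sum

def pvMonoB (M M' : List (List Bool)) : Prop :=
  ∀ i j : Int, 0 ≤ i → 0 ≤ j → pvGetB M i j = true → pvGetB M' i j = true

structure pvPackB (grid : List String) (rows cols : Int) (M : List (List Bool)) : Prop where
  shape : pvShaped rows cols M
  sound : ∀ i j : Int, 0 ≤ i → 0 ≤ j → pvGetB M i j = true → pvReach grid rows cols i j

def pvFire (grid : List String) (rows cols : Int) (M : List (List Bool)) (i j : Int) : Prop :=
  pvGetB M i j = false ∧ pvEmp grid i j ∧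
    ((0 < i ∧ pvGetB M (i - 1) j = true) ∨ (i + 1 < rows ∧ pvGetB M (i + 1) j = true) ∨
      (0 < j ∧ pvGetB M i (j - 1) = true) ∨ (j + 1 < cols ∧ pvGetB M i (j + 1) = true))

lemma pvGetB_pvSetB_self (m : List (List Bool)) {rows cols i j : Int}
    (hsh : pvShaped rows cols m) (hin : pvInR rows cols i j) :
    pvGetB (pvSetB m i j) i j = true := by
  obtain ⟨hi0, hir, hj0, hjc⟩ := hin
  have hlen : i.toNat < m.length := by rw [hsh.1]; omega
  have hget : m.getD i.toNat [] = m[i.toNat] := List.getD_eq_getElem m [] hlen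
  have hrow : j.toNat < (m.getD i.toNat []).length := by
    rw [hget, hsh.2 _ (List.getElem_mem hlen)]; omega
  exact pvNest_get_set_self m [] true false hi0 hj0 hlen hrow

lemma pvGetB_pvSetB_ne (m : List (List Bool)) {i j a' b' : Int}
    (hi : 0 ≤ i) (hj : 0 ≤ j) (ha : 0 ≤ a') (hb : 0 ≤ b') (hne : a' ≠ i ∨ b' ≠ j) :
    pvGetB (pvSetB m i j) a' b' = pvGetB m a' b' :=
  pvNest_get_set_ne m [] true false hi hj ha hb hne

lemma pvShaped_pvSetB (m : List (List Bool)) {rows cols i j : Int}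
    (hsh : pvShaped rows cols m) (hin : pvInR rows cols i j) :
    pvShaped rows cols (pvSetB m i j) :=
  pvNest_shaped_set m [] true hsh hin.1 hin.2.2.1 (by rw [hsh.1]; have := hin.2.1; have := hin.1; omega)

lemma pvMonoB_pvSetB (m : List (List Bool)) {rows cols i j : Int}
    (hsh : pvShaped rows cols m) (hin : pvInR rows cols i j) :
    pvMonoB m (pvSetB m i j) := by
  intro a b ha hb hv
  rcases Decidable.em (a = i ∧ b = j) with ⟨rfl, rfl⟩ | hne
  · exact pvGetB_pvSetB_self m hsh hin
  · rw [pvGetB_pvSetB_ne m hin.1 hin.2.2.1 ha hb (by tauto)]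
    exact hv

lemma pvTrues_pvSetB (m : List (List Bool)) {rows cols i j : Int}
    (hsh : pvShaped rows cols m) (hin : pvInR rows cols i j)
    (h0 : pvGetB m i j = false) :
    pvTrues (pvSetB m i j) = pvTrues m + 1 := by
  obtain ⟨hi0, hir, hj0, hjc⟩ := hin
  have hlen : i.toNat < m.length := by rw [hsh.1]; omega
  have hget : m.getD i.toNat [] = m[i.toNat] := List.getD_eq_getElem m [] hlen
  have hrow : j.toNat < (m.getD i.toNat []).length := by
    rw [hget, hsh.2 _ (List.getElem_mem hlen)]; omega
  have hrow' : j.toNat < m[i.toNat].length := by rw [← hget]; exact hrow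
  have hc := pvNest_count_set m [] true (fun v => v) hi0 hj0 hlen hrow
  have hv1 : (m.getD i.toNat []).getD j.toNat true = m[i.toNat][j.toNat] := by
    rw [hget]; exact List.getD_eq_getElem _ _ hrow'
  have hv0 : pvGetB m i j = m[i.toNat][j.toNat] := by
    rw [pvGetB, pvNest_get_nonneg m [] false hi0 hj0, hget]
    exact List.getD_eq_getElem _ _ hrow'
  rw [hv1, ← hv0, h0] at hc
  simp only [pvTrues, pvSetB]
  simp at hc
  omega

lemma pvCountRows_le {a : Type} (p : a → Bool) (C : Nat) :
    ∀ (M : List (List a)), (∀ r ∈ M, r.length = C) →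
      (M.map (fun r => r.countP p)).sum ≤ M.length * C := by
  intro M
  induction M with
  | nil => simp
  | cons r M ih =>
    intro h
    have h1 : r.countP p ≤ C := by
      rw [← h r List.mem_cons_self]; exact List.countP_le_length
    have h2 := ih (fun r' hr' => h r' (List.mem_cons_of_mem _ hr'))
    simp only [List.map_cons, List.sum_cons, List.length_cons]
    calc r.countP p + (M.map (fun r => r.countP p)).sum ≤ C + M.length * C := by omega
      _ = (M.length + 1) * C := by ring

lemma pvTrues_le {grid : List String} {rows cols : Int} {M : List (List Bool)}
    (h : pvPackB grid rows cols M) : pvTrues M ≤ rows.toNat * cols.toNat := by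
  have := pvCountRows_le (fun v => v) cols.toNat M h.shape.2
  rw [h.shape.1] at this
  exact this

lemma pvCell_spec (grid : List String) (rows cols : Int) (M : List (List Bool)) (c : Bool)
    (p : Int × Int) (hp : pvInR rows cols p.1 p.2) (h : pvPackB grid rows cols M) :
    pvPackB grid rows cols (pvCell grid rows cols (M, c) p).1 ∧
    pvMonoB M (pvCell grid rows cols (M, c) p).1 ∧
    (c = true → (pvCell grid rows cols (M, c) p).2 = true) ∧
    ((pvCell grid rows cols (M, c) p).2 = false →
      (pvCell grid rows cols (M, c) p).1 = M ∧ c = false ∧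
        ¬ pvFire grid rows cols M p.1 p.2) ∧
    pvTrues M ≤ pvTrues (pvCell grid rows cols (M, c) p).1 ∧
    (c = false → (pvCell grid rows cols (M, c) p).2 = true →
      pvTrues M < pvTrues (pvCell grid rows cols (M, c) p).1) := by
  obtain ⟨i, j⟩ := p
  simp only [pvInR] at hp
  simp only [pvCell]
  split_ifs with hg
  · have hb := hg
    simp only [Bool.and_eq_true, Bool.or_eq_true, Bool.not_eq_eq_eq_not, Bool.not_true,
      bne_iff_ne, ne_eq, decide_eq_true_eq] at hb
    obtain ⟨⟨h0, hE⟩, hN⟩ := hb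
    have hemp : pvEmp grid i j := hE
    have hin : pvInR rows cols i j := hp
    have hreach : pvReach grid rows cols i j := by
      rcases hN with ((⟨hlt, ht⟩ | ⟨hlt, ht⟩) | ⟨hlt, ht⟩) | ⟨hlt, ht⟩
      · exact pvReach.step (i - 1) j i j (h.sound (i - 1) j (by omega) hp.2.2.1 ht) hin hemp
          (by unfold pvAdj; omega)
      · exact pvReach.step (i + 1) j i j (h.sound (i + 1) j (by omega) hp.2.2.1 ht) hin hemp
          (by unfold pvAdj; omega)
      · exact pvReach.step i (j - 1) i j (h.sound i (j - 1) hp.1 (by omega) ht) hin hemp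
          (by unfold pvAdj; omega)
      · exact pvReach.step i (j + 1) i j (h.sound i (j + 1) hp.1 (by omega) ht) hin hemp
          (by unfold pvAdj; omega)
    refine ⟨⟨pvShaped_pvSetB M h.shape hin, ?_⟩, pvMonoB_pvSetB M h.shape hin, fun _ => rfl,
      fun habs => absurd habs (by simp), ?_, fun _ _ => ?_⟩
    · intro a b ha hb' hv
      rcases Decidable.em (a = i ∧ b = j) with ⟨rfl, rfl⟩ | hne
      · exact hreach
      · rw [pvGetB_pvSetB_ne M hin.1 hin.2.2.1 ha hb' (by tauto)] at hv
        exact h.sound a b ha hb' hv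
    · rw [pvTrues_pvSetB M h.shape hin h0]
      omega
    · rw [pvTrues_pvSetB M h.shape hin h0]
      omega
  · refine ⟨h, fun _ _ _ _ hv => hv, fun hc => hc, ?_, le_refl _, ?_⟩
    · intro hcf
      refine ⟨rfl, hcf, ?_⟩
      intro hfire
      obtain ⟨hf0, hfE, hfN⟩ := hfire
      apply hg
      simp only [Bool.and_eq_true, Bool.or_eq_true, Bool.not_eq_eq_eq_not, Bool.not_true,
        bne_iff_ne, ne_eq, decide_eq_true_eq]
      refine ⟨⟨hf0, hfE⟩, ?_⟩
      tauto
    · intro hc h2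
      have h2' : c = true := h2
      rw [hc] at h2'
      cases h2'

lemma pvSweep_spec (grid : List String) (rows cols : Int) :
    ∀ (order : List (Int × Int)) (M : List (List Bool)) (c : Bool),
      (∀ p ∈ order, pvInR rows cols p.1 p.2) → pvPackB grid rows cols M →
      pvPackB grid rows cols (pvSweep grid rows cols order (M, c)).1 ∧
      pvMonoB M (pvSweep grid rows cols order (M, c)).1 ∧
      (c = true → (pvSweep grid rows cols order (M, c)).2 = true) ∧
      ((pvSweep grid rows cols order (M, c)).2 = false →
        (pvSweep grid rows cols order (M, c)).1 = M ∧ c = false ∧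
          (∀ p ∈ order, ¬ pvFire grid rows cols M p.1 p.2)) ∧
      pvTrues M ≤ pvTrues (pvSweep grid rows cols order (M, c)).1 ∧
      (c = false → (pvSweep grid rows cols order (M, c)).2 = true →
        pvTrues M < pvTrues (pvSweep grid rows cols order (M, c)).1) := by
  intro order
  induction order with
  | nil =>
    intro M c _ h
    refine ⟨h, fun _ _ _ _ hv => hv, fun hc => hc,
      fun hf => ⟨rfl, hf, fun p hp => absurd hp (by simp)⟩, le_refl _, ?_⟩
    intro hc h2
    have h2' : c = true := h2
    rw [hc] at h2'
    cases h2'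
  | cons q order ih =>
    intro M c horder h
    have hq := horder q List.mem_cons_self
    obtain ⟨C1, C2, C3, C4, C5, C6⟩ := pvCell_spec grid rows cols M c q hq h
    simp only [pvSweep, List.foldl_cons]
    set s1 := pvCell grid rows cols (M, c) q with hs1
    obtain ⟨I1, I2, I3, I4, I5, I6⟩ :=
      ih s1.1 s1.2 (fun p hp => horder p (List.mem_cons_of_mem _ hp)) C1
    have hsw : (order.foldl (pvCell grid rows cols) s1) =
        (pvSweep grid rows cols order (s1.1, s1.2)) := rfl
    rw [hsw]
    refine ⟨I1, ?_, ?_, ?_, ?_, ?_⟩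
    · intro a b ha hb hv
      exact I2 a b ha hb (C2 a b ha hb hv)
    · intro hc
      exact I3 (C3 hc)
    · intro hf
      obtain ⟨e1, e2, e3⟩ := I4 hf
      obtain ⟨f1, f2, f3⟩ := C4 e2
      rw [f1] at e3
      refine ⟨e1.trans f1, f2, ?_⟩
      intro p hp
      rcases List.mem_cons.mp hp with rfl | hp'
      · exact f3
      · exact e3 p hp'
    · exact le_trans C5 I5
    · intro hc hf
      rcases Bool.eq_false_or_eq_true s1.2 with hs2 | hs2
      · exact lt_of_lt_of_le (C6 hc hs2) I5
      · obtain ⟨f1, f2, f3⟩ := C4 hs2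
        have hstep := I6 hs2 hf
        exact lt_of_le_of_lt (le_of_eq (congrArg pvTrues f1.symm)) hstep

lemma pvFwd_mem (rows cols : Int) (p : Int × Int) :
    p ∈ pvFwd rows cols ↔ pvInR rows cols p.1 p.2 := by
  obtain ⟨a, b⟩ := p
  constructor
  · intro hm
    simp only [pvFwd, List.mem_flatMap, List.mem_map, PySem.List.mem_pyRange_one] at hm
    obtain ⟨i, hi, j, hj, heq⟩ := hm
    obtain ⟨rfl, rfl⟩ := Prod.mk.inj heq.symm
    exact ⟨hi.1, hi.2, hj.1, hj.2⟩
  · intro hin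
    simp only [pvFwd, List.mem_flatMap, List.mem_map, PySem.List.mem_pyRange_one]
    exact ⟨a, ⟨hin.1, hin.2.1⟩, b, ⟨hin.2.2.1, hin.2.2.2⟩, rfl⟩

lemma pvLoopB_spec (grid : List String) (rows cols : Int) :
    ∀ (fuel : Nat) (M : List (List Bool)), pvPackB grid rows cols M →
      rows.toNat * cols.toNat - pvTrues M < fuel →
      pvPackB grid rows cols
          (pvLoopB grid rows cols (pvFwd rows cols) ((pvFwd rows cols).reverse) fuel M) ∧
        pvMonoB M
          (pvLoopB grid rows cols (pvFwd rows cols) ((pvFwd rows cols).reverse) fuel M) ∧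
        (∀ i j : Int, pvInR rows cols i j →
          ¬ pvFire grid rows cols
            (pvLoopB grid rows cols (pvFwd rows cols) ((pvFwd rows cols).reverse) fuel M) i j) := by
  have hfwd : ∀ p ∈ pvFwd rows cols, pvInR rows cols p.1 p.2 :=
    fun p hp => (pvFwd_mem rows cols p).mp hp
  have hbwd : ∀ p ∈ (pvFwd rows cols).reverse, pvInR rows cols p.1 p.2 :=
    fun p hp => hfwd p (List.mem_reverse.mp hp)
  intro fuel
  induction fuel with
  | zero => intro M _ hf; omega
  | succ fuel ih =>
    intro M h hf
    rw [pvLoopB]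
    obtain ⟨T1, T2, T3, T4, T5, T6⟩ :=
      pvSweep_spec grid rows cols (pvFwd rows cols) M false hfwd h
    set t := pvSweep grid rows cols (pvFwd rows cols) (M, false) with ht
    obtain ⟨S1, S2, S3, S4, S5, S6⟩ :=
      pvSweep_spec grid rows cols ((pvFwd rows cols).reverse) t.1 t.2 hbwd T1
    have hts : pvSweep grid rows cols ((pvFwd rows cols).reverse) t =
        pvSweep grid rows cols ((pvFwd rows cols).reverse) (t.1, t.2) := rfl
    rw [hts]
    set s := pvSweep grid rows cols ((pvFwd rows cols).reverse) (t.1, t.2) with hs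
    rcases Bool.eq_false_or_eq_true s.2 with hs2 | hs2
    · rw [hs2, if_pos rfl]
      have hstrict : pvTrues M < pvTrues s.1 := by
        rcases Bool.eq_false_or_eq_true t.2 with ht2 | ht2
        · exact lt_of_lt_of_le (T6 rfl ht2) S5
        · obtain ⟨f1, _, _⟩ := T4 ht2
          have hstep := S6 ht2 hs2
          exact lt_of_le_of_lt (le_of_eq (congrArg pvTrues f1.symm)) hstep
      have hle := pvTrues_le S1
      have hrec := ih s.1 S1 (by omega)
      refine ⟨hrec.1, ?_, hrec.2.2⟩
      intro a b ha hb hv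
      exact hrec.2.1 a b ha hb (S2 a b ha hb (T2 a b ha hb hv))
    · rw [hs2, if_neg (by simp)]
      obtain ⟨e1, e2, e3⟩ := S4 hs2
      obtain ⟨f1, f2, f3⟩ := T4 e2
      rw [f1] at e3
      rw [e1.trans f1]
      refine ⟨h, fun _ _ _ _ hv => hv, ?_⟩
      intro i j hin
      exact f3 (i, j) ((pvFwd_mem rows cols (i, j)).mpr hin)

lemma pvM0_get_in (grid : List String) {i j : Int}
    (hin : pvInR (pvRowI grid) (pvColI grid) i j) :
    pvGetB (pvM0 grid) i j =
      ((pvGridAt grid i j != '#') &&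
        (i == 0 || i == pvRowI grid - 1 || j == 0 || j == pvColI grid - 1)) := by
  obtain ⟨hi0, hir, hj0, hjc⟩ := hin
  rw [pvGetB, pvM0,
    PySem.List.pyGetD_map_pyRange_of_nonneg _ (pvRowI grid) i [] hi0 hir,
    PySem.List.pyGetD_map_pyRange_of_nonneg _ (pvColI grid) j false hj0 hjc]

lemma pvM0_shape (grid : List String) : pvShaped (pvRowI grid) (pvColI grid) (pvM0 grid) := by
  constructor
  · simp [pvM0, PySem.List.length_pyRange_one]
  · intro r hr
    simp only [pvM0, List.mem_map] at hr
    obtain ⟨_, _, rfl⟩ := hr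
    simp [PySem.List.length_pyRange_one]

lemma pvM0_pack (grid : List String) : pvPackB grid (pvRowI grid) (pvColI grid) (pvM0 grid) := by
  refine ⟨pvM0_shape grid, ?_⟩
  intro i j hi hj hv
  by_cases hin : pvInR (pvRowI grid) (pvColI grid) i j
  · rw [pvM0_get_in grid hin] at hv
    simp only [Bool.and_eq_true, Bool.or_eq_true, bne_iff_ne, ne_eq, beq_iff_eq] at hv
    exact pvReach.seed i j hin (by unfold pvBorder; tauto) hv.1
  · exfalso
    have hsh := pvM0_shape grid
    rw [pvGetB, pvNest_get_nonneg _ [] false hi hj] at hv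
    rcases pvListGetD_cases (pvM0 grid) i.toNat [] with hd | hd
    · rw [hd] at hv; simp at hv
    · have hilen : i.toNat < (pvM0 grid).length := by
        by_contra hge
        rw [show (pvM0 grid).getD i.toNat [] = [] from
          List.getD_eq_default _ _ (by omega)] at hv
        simp at hv
      have hrlen : ((pvM0 grid).getD i.toNat []).length = (pvColI grid).toNat := by
        rw [List.getD_eq_getElem _ _ hilen]
        exact hsh.2 _ (List.getElem_mem hilen)
      have hjlen : j.toNat < ((pvM0 grid).getD i.toNat []).length := by
        by_contra hge
        rw [List.getD_eq_default _ _ (by omega)] at hv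
        simp at hv
      apply hin
      have h1 := hsh.1
      rw [hrlen] at hjlen
      exact ⟨hi, by omega, hj, by omega⟩

lemma pvM0_seed (grid : List String) {i j : Int}
    (hin : pvInR (pvRowI grid) (pvColI grid) i j)
    (hbord : pvBorder (pvRowI grid) (pvColI grid) i j) (hemp : pvEmp grid i j) :
    pvGetB (pvM0 grid) i j = true := by
  rw [pvM0_get_in grid hin]
  simp only [Bool.and_eq_true, Bool.or_eq_true, bne_iff_ne, ne_eq, beq_iff_eq]
  refine ⟨hemp, ?_⟩
  unfold pvBorder at hbord
  tauto

lemma pvB_char (grid : List String) :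
    pvPackB grid (pvRowI grid) (pvColI grid) (pvFinalM grid) ∧
      (∀ i j : Int, 0 ≤ i → 0 ≤ j →
        (pvGetB (pvFinalM grid) i j = true ↔ pvReach grid (pvRowI grid) (pvColI grid) i j)) := by
  have hfuel : (pvRowI grid).toNat * (pvColI grid).toNat - pvTrues (pvM0 grid)
      < (pvRowI grid).toNat * (pvColI grid).toNat + 1 := by
    set N := (pvRowI grid).toNat * (pvColI grid).toNat with hN
    omega
  obtain ⟨P, Mo, NF⟩ := pvLoopB_spec grid (pvRowI grid) (pvColI grid)
    ((pvRowI grid).toNat * (pvColI grid).toNat + 1) (pvM0 grid) (pvM0_pack grid) hfuel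
  have hFeq : pvFinalM grid = pvLoopB grid (pvRowI grid) (pvColI grid)
      (pvFwd (pvRowI grid) (pvColI grid)) ((pvFwd (pvRowI grid) (pvColI grid)).reverse)
      ((pvRowI grid).toNat * (pvColI grid).toNat + 1) (pvM0 grid) := rfl
  rw [← hFeq] at P Mo NF
  refine ⟨P, ?_⟩
  intro i j hi hj
  constructor
  · exact P.sound i j hi hj
  · intro hreach
    induction hreach with
    | seed a b hin hbord hemp =>
      exact Mo a b hin.1 hin.2.2.1 (pvM0_seed grid hin hbord hemp)
    | step x y a b hxy hin hemp hadj ih =>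
      have hih := ih (pvReach_inR hxy).1 (pvReach_inR hxy).2.2.1
      rcases Bool.eq_false_or_eq_true (pvGetB (pvFinalM grid) a b) with hb | hb
      · exact hb
      · exfalso
        apply NF a b hin
        refine ⟨hb, hemp, ?_⟩
        have hxin := pvReach_inR hxy
        have hx1 : (0 : Int) ≤ x := hxin.1
        have hx2 : x < pvRowI grid := hxin.2.1
        have hx3 : (0 : Int) ≤ y := hxin.2.2.1
        have hx4 : y < pvColI grid := hxin.2.2.2
        rcases pvAdj_cases hadj with ⟨h1, h2⟩ | ⟨h1, h2⟩ | ⟨h1, h2⟩ | ⟨h1, h2⟩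
        · exact Or.inl ⟨by omega, by rw [show a - 1 = x by omega, show b = y by omega]; exact hih⟩
        · exact Or.inr (Or.inl ⟨by omega,
            by rw [show a + 1 = x by omega, show b = y by omega]; exact hih⟩)
        · exact Or.inr (Or.inr (Or.inl ⟨by omega,
            by rw [show a = x by omega, show b - 1 = y by omega]; exact hih⟩))
        · exact Or.inr (Or.inr (Or.inr ⟨by omega,
            by rw [show a = x by omega, show b + 1 = y by omega]; exact hih⟩))


-- ---------- positivity of the dimensions under Pre_ ----------
lemma pvRow_pos (grid : List String) (hpre : Pre_solution grid) : 0 < pvRowI grid := by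
  rw [pvRowI, PySem.List.len_eq]
  have : grid ≠ [] := hpre.1
  have : 0 < grid.length := List.length_pos_of_ne_nil this
  omega

lemma pvCol_pos (grid : List String) (hpre : Pre_solution grid) : 0 < pvColI grid := by
  rw [pvColI, PySem.List.pyGetD_zero, PySem.Str.len_eq]
  have h := hpre.2.1
  cases grid with
  | nil => exact absurd rfl hpre.1
  | cons a l =>
    simp only [List.getD_cons_zero]
    simp only [List.headD_cons] at h
    omega

-- ---------- the two counts agree ----------
lemma pvMain (grid : List String) (hpre : Pre_solution grid) :
    solution grid = solution_alt grid := by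
  have hr := pvRow_pos grid hpre
  have hc := pvCol_pos grid hpre
  obtain ⟨hAbits, hAchar⟩ := pvA_char grid hr hc
  obtain ⟨hBpack, hBchar⟩ := pvB_char grid
  have hlenM : PySem.List.len (pvFinalM grid) = pvRowI grid := by
    rw [PySem.List.len_eq, hBpack.shape.1]
    omega
  have hB1 : (pvFinalM grid).foldl
        (fun acc r => r.foldl (fun acc v => if !v then acc + 1 else acc) acc) (0 : Int)
      = (PySem.List.pyRange 0 (PySem.List.len (pvFinalM grid))).foldl
          (fun acc i => (PySem.List.pyGetD (pvFinalM grid) i []).foldl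
            (fun acc v => if !v then acc + 1 else acc) acc) 0 :=
    (PySem.List.foldl_pyRange_zero_pyGetD (pvFinalM grid) []
      (fun acc r => r.foldl (fun acc v => if !v then acc + 1 else acc) acc) 0).symm
  rw [solution_eq, solution_alt_eq, hB1, hlenM]
  apply PySem.List.foldl_congr_mem
  intro acc i hi
  have hi' := PySem.List.mem_pyRange_one.mp hi
  have hilen : i.toNat < (pvFinalM grid).length := by
    rw [hBpack.shape.1]
    omega
  have hrowlen : (PySem.List.pyGetD (pvFinalM grid) i []).length = (pvColI grid).toNat := by
    rw [pvGetD_nonneg _ _ hi'.1, List.getD_eq_getElem _ _ hilen]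
    exact hBpack.shape.2 _ (List.getElem_mem hilen)
  have hlenrow : PySem.List.len (PySem.List.pyGetD (pvFinalM grid) i []) = pvColI grid := by
    rw [PySem.List.len_eq, hrowlen]
    omega
  have hB2 : (PySem.List.pyGetD (pvFinalM grid) i []).foldl
        (fun acc v => if !v then acc + 1 else acc) acc
      = (PySem.List.pyRange 0 (PySem.List.len (PySem.List.pyGetD (pvFinalM grid) i []))).foldl
          (fun acc j => if !(PySem.List.pyGetD (PySem.List.pyGetD (pvFinalM grid) i []) j false)
            then acc + 1 else acc) acc :=
    (PySem.List.foldl_pyRange_zero_pyGetD (PySem.List.pyGetD (pvFinalM grid) i []) false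
      (fun acc v => if !v then acc + 1 else acc) acc).symm
  rw [hB2, hlenrow]
  apply PySem.List.foldl_congr_mem
  intro acc2 j hj
  have hj' := PySem.List.mem_pyRange_one.mp hj
  have hcond : (pvGetV (pvFinalV grid) i j == 0)
      = !(PySem.List.pyGetD (PySem.List.pyGetD (pvFinalM grid) i []) j false) := by
    have hgb : PySem.List.pyGetD (PySem.List.pyGetD (pvFinalM grid) i []) j false
        = pvGetB (pvFinalM grid) i j := rfl
    rw [hgb]
    rcases Bool.eq_false_or_eq_true (pvGetB (pvFinalM grid) i j) with hb | hb
    · have hre := (hBchar i j hi'.1 hj'.1).mp hb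
      have hv1 := (hAchar i j hi'.1 hj'.1).mpr hre
      rw [hb, hv1]
      rfl
    · have hnre : ¬ pvReach grid (pvRowI grid) (pvColI grid) i j := by
        intro hre
        rw [(hBchar i j hi'.1 hj'.1).mpr hre] at hb
        cases hb
      have hv0 : pvGetV (pvFinalV grid) i j = 0 := by
        rcases pvGetV_cases (pvFinalV grid) hAbits i j with h0 | h1
        · exact h0
        · exact absurd ((hAchar i j hi'.1 hj'.1).mp h1) hnre
      rw [hb, hv0]
      rfl
  rw [hcond]

-- ===== VERDICT (by name: the statement is the Claim_ definition above) =====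
theorem solution_spec : Claim_equal_solution := by
  intro grid _ hpre
  unfold Spec_solution
  exact pvMain grid hpre
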